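-- pv_equiv track=rewrite | github.com/grlinski/hackerrank-solutions-python | HR Gemstones.py | gemstones
-- ===== SOURCE A (Python) =====
-- def gemstones(arr):
--     gems = set()
--     x = arr[0]
--     newgems =set()
--
--     # Get gems from first entry
--     for i in range(0,len(x)):
--         gems.add(x[i])
--
--     for j in range(1,len(arr)):
--         newgems = set()
--         q = arr[j]
--         for k in range(0,len(q)):
--             x = q[k]
--             if x in gems:
--                 newgems.add(x)
--         gems = newgems
--     return gems
-- ===== SOURCE B (Python) =====
-- def gemstones(arr):
--     counts = {}
--     for s in arr:
--         for c in set(s):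
--             counts[c] = counts.get(c, 0) + 1
--     n = len(arr)
--     return {c for c in arr[-1] if counts.get(c, 0) == n}
-- ===== Notes on version B (the rewrite author's own statement) =====
-- stated objective: alternative
-- what changed: Replaces the running-intersection set that is rebuilt for every string with a single tally pass counting, per distinct character, in how many strings it occurs, then filters the last string's characters by count == len(arr).
import Mathlib
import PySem

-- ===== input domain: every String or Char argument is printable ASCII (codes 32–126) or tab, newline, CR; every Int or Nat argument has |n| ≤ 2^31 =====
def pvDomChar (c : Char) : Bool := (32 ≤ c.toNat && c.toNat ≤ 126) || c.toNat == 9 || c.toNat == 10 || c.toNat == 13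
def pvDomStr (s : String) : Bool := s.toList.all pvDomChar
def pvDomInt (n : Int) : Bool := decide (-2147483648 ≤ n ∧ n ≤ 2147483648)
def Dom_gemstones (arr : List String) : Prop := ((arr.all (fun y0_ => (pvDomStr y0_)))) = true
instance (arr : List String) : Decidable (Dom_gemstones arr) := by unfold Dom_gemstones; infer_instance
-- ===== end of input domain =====

-- B replaces A's running intersection set (rebuilt while scanning every string) by one tally pass
-- counting in how many strings each character occurs, then filters the last string's characters
-- by count == len(arr). Same algorithmic cost; equivalence is about the return value.

-- ===== PORT A =====
-- In Python, s[i] on a string is the 1-character STRING: the ports traverse strings as lists of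
-- 1-character strings (exact on every input).
def pyChars (s : String) : List String := s.toList.map (fun c => String.ofList [c])

def gemstones (arr : List String) : List String :=
  let x := PySem.List.pyGetD arr 0 ""
  let gems : PySem.Set String :=
    (PySem.List.pyRange 0 (PySem.Str.len x) 1).foldl
      (fun g i => PySem.Set.add g (PySem.List.pyGetD (pyChars x) i "")) PySem.Set.empty
  (PySem.List.pyRange 1 (arr.length : Int) 1).foldl
    (fun gems j =>
      let q := PySem.List.pyGetD arr j ""
      (PySem.List.pyRange 0 (PySem.Str.len q) 1).foldl
        (fun newgems k =>
          let c := PySem.List.pyGetD (pyChars q) k ""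
          if PySem.Set.contains gems c then PySem.Set.add newgems c else newgems)
        PySem.Set.empty)
    gems

-- ===== PORT B =====
def gemstones_alt (arr : List String) : List String :=
  let counts : PySem.Dict String Int :=
    arr.foldl
      (fun d s => (PySem.Set.ofList (pyChars s)).foldl (fun d c => d.insert c (d.getD c 0 + 1)) d)
      PySem.Dict.empty
  let n : Int := arr.length
  (pyChars (PySem.List.pyGetD arr (-1) "")).foldl
    (fun out c => if counts.getD c 0 == n then PySem.Set.add out c else out)
    PySem.Set.empty

-- ===== PRECONDITION & SPEC =====
-- A evaluates arr[0] first thing, so the empty list raises IndexError (B raises too, at arr[-1]).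
def Pre_gemstones (arr : List String) : Prop := arr ≠ []
instance (arr : List String) : Decidable (Pre_gemstones arr) := by unfold Pre_gemstones; infer_instance

def pvWitness_gemstones : List String := ["abc", "bcd"]

def Spec_gemstones (arr : List String) (out : List String) : Prop := out = gemstones_alt arr
instance (arr : List String) (out : List String) : Decidable (Spec_gemstones arr out) := by unfold Spec_gemstones; infer_instance

-- ===== CLAIM (what is proved, stated in full; the proofs are below) =====
def Claim_equal_gemstones : Prop := ∀ (arr : List String), Dom_gemstones arr → Pre_gemstones arr → Spec_gemstones arr (gemstones arr)

-- ===== LEMMAS AND PROOFS =====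

-- clean fold forms of A's two phases
def gemsSeed (x : String) : PySem.Set String := PySem.Set.ofList (pyChars x)

def gemsStep (g : PySem.Set String) (q : String) : PySem.Set String :=
  (pyChars q).foldl
    (fun ng c => if PySem.Set.contains g c then PySem.Set.add ng c else ng) PySem.Set.empty

lemma length_pyChars (s : String) : (pyChars s).length = s.toList.length := by
  simp [pyChars]

lemma gemstones_eq (x : String) (rest : List String) :
    gemstones (x :: rest) = rest.foldl gemsStep (gemsSeed x) := by
  unfold gemstones
  simp only [PySem.List.pyGetD_zero_cons, PySem.Str.len_eq]
  rw [show ((x.toList.length : Int)) = ((pyChars x).length : Int) by rw [length_pyChars],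
      PySem.List.foldl_pyRange_zero_pyGetD' (pyChars x) "" PySem.Set.add PySem.Set.empty,
      PySem.List.foldl_pyRange_pyGetD' (x :: rest) ""
        (fun gems q =>
          List.foldl
            (fun newgems k =>
              if PySem.Set.contains gems (PySem.List.pyGetD (pyChars q) k "") then
                PySem.Set.add newgems (PySem.List.pyGetD (pyChars q) k "")
              else newgems)
            PySem.Set.empty (PySem.List.pyRange 0 (q.toList.length : Int)))
        (List.foldl PySem.Set.add PySem.Set.empty (pyChars x)) (by norm_num : (0:Int) ≤ 1)]
  simp only [Int.toNat_one, List.drop_succ_cons, List.drop_zero]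
  have hseed : List.foldl PySem.Set.add PySem.Set.empty (pyChars x) = gemsSeed x := by
    unfold gemsSeed
    rw [PySem.Set.ofList_eq_foldl]
    rfl
  rw [hseed]
  apply PySem.List.foldl_congr_mem
  intro g q _
  unfold gemsStep
  rw [show ((q.toList.length : Int)) = ((pyChars q).length : Int) by rw [length_pyChars],
      PySem.List.foldl_pyRange_zero_pyGetD' (pyChars q) ""
        (fun ng c => if PySem.Set.contains g c then PySem.Set.add ng c else ng) PySem.Set.empty]

lemma mem_filterFold (l : List String) (P : String → Bool) (init : PySem.Set String) (c : String) :
    (c ∈ l.foldl (fun acc y => if P y then PySem.Set.add acc y else acc) init) ↔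
      c ∈ init ∨ (c ∈ l ∧ P c = true) := by
  induction l generalizing init with
  | nil => simp
  | cons h t ih =>
    simp only [List.foldl_cons, List.mem_cons]
    by_cases hp : P h = true
    · rw [if_pos hp, ih]
      simp only [PySem.Set.mem_add]
      constructor
      · rintro ((hi | rfl) | ⟨ht, hcp⟩)
        · exact Or.inl hi
        · exact Or.inr ⟨Or.inl rfl, hp⟩
        · exact Or.inr ⟨Or.inr ht, hcp⟩
      · rintro (hi | ⟨(rfl | ht), hcp⟩)
        · exact Or.inl (Or.inl hi)
        · exact Or.inl (Or.inr rfl)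
        · exact Or.inr ⟨ht, hcp⟩
    · rw [if_neg hp, ih]
      constructor
      · rintro (hi | ⟨ht, hcp⟩)
        · exact Or.inl hi
        · exact Or.inr ⟨Or.inr ht, hcp⟩
      · rintro (hi | ⟨(rfl | ht), hcp⟩)
        · exact Or.inl hi
        · exact absurd hcp hp
        · exact Or.inr ⟨ht, hcp⟩

lemma mem_gemsStep (g : PySem.Set String) (q c : String) :
    c ∈ gemsStep g q ↔ c ∈ pyChars q ∧ c ∈ g := by
  unfold gemsStep
  rw [mem_filterFold]
  simp [PySem.Set.empty]

lemma mem_foldl_gemsStep (rest : List String) (g : PySem.Set String) (c : String) :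
    c ∈ rest.foldl gemsStep g ↔ c ∈ g ∧ ∀ q ∈ rest, c ∈ pyChars q := by
  induction rest generalizing g with
  | nil => simp
  | cons h t ih =>
    simp only [List.foldl_cons, ih, mem_gemsStep, List.mem_cons]
    constructor
    · rintro ⟨⟨hq, hg⟩, hall⟩
      exact ⟨hg, fun q hq' => hq'.elim (fun e => e ▸ hq) (hall q)⟩
    · rintro ⟨hg, hall⟩
      exact ⟨⟨hall h (Or.inl rfl), hg⟩, fun q hq' => hall q (Or.inr hq')⟩

lemma counts_getD (arr : List String) (d : PySem.Dict String Int) (c : String) :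
    (arr.foldl
      (fun d s => (PySem.Set.ofList (pyChars s)).foldl (fun d c => d.insert c (d.getD c 0 + 1)) d)
      d).getD c 0
      = d.getD c 0 + (arr.countP (fun s => decide (c ∈ pyChars s)) : Int) := by
  induction arr generalizing d with
  | nil => simp
  | cons s t ih =>
    simp only [List.foldl_cons, ih, PySem.Dict.getD_foldl_insert_add_one]
    have hcount : List.count c (PySem.Set.ofList (pyChars s)) = if c ∈ pyChars s then 1 else 0 := by
      rw [List.Nodup.count (PySem.Set.nodup_ofList _)]
      simp [PySem.Set.mem_ofList]
    rw [hcount, List.countP_cons]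
    by_cases h : c ∈ pyChars s <;> simp [h]
    ring

-- the two filtering conditions agree on every character of the last string
lemma cond_agree (x : String) (ys : List String) (q c : String) (hc : c ∈ pyChars q) :
    PySem.Set.contains (ys.foldl gemsStep (gemsSeed x)) c =
      ((((x :: ys) ++ [q]).countP (fun s => decide (c ∈ pyChars s)) : Int)
        == (((x :: ys) ++ [q]).length : Int)) := by
  rw [Bool.eq_iff_iff, PySem.Set.contains_iff, mem_foldl_gemsStep, beq_iff_eq,
      Int.natCast_inj, List.countP_eq_length]
  constructor
  · rintro ⟨hx, hall⟩ s hs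
    have hs' : s = x ∨ s ∈ ys ∨ s = q := by
      simpa [or_assoc] using hs
    rcases hs' with rfl | hs2 | rfl
    · simpa [gemsSeed, PySem.Set.mem_ofList] using hx
    · simpa using hall s hs2
    · simpa using hc
  · intro hall
    refine ⟨?_, fun s hs => by simpa using hall s (by simp [hs])⟩
    have := hall x (by simp)
    simpa [gemsSeed, PySem.Set.mem_ofList] using this

lemma countsOf_eq (arr : List String) (c : String) :
    (arr.foldl
      (fun d s => (PySem.Set.ofList (pyChars s)).foldl (fun d c => d.insert c (d.getD c 0 + 1)) d)
      PySem.Dict.empty).getD c 0 = (arr.countP (fun s => decide (c ∈ pyChars s)) : Int) := by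
  rw [counts_getD]; simp

-- ===== VERDICT (by name: the statement is the Claim_ definition above) =====
theorem gemstones_spec : Claim_equal_gemstones := by
  intro arr _ hpre
  show gemstones arr = gemstones_alt arr
  cases arr with
  | nil => exact absurd rfl hpre
  | cons x rest =>
    rw [gemstones_eq]
    rcases List.eq_nil_or_concat rest with rfl | ⟨ys, q, rfl⟩
    · -- single string: A keeps every distinct character of x
      simp only [gemstones_alt, List.foldl_nil]
      rw [PySem.List.pyGetD_neg_one [x] "" (by simp), List.getLast_singleton]
      rw [show gemsSeed x = List.foldl PySem.Set.add PySem.Set.empty (pyChars x) by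
            unfold gemsSeed
            rw [PySem.Set.ofList_eq_foldl]
            rfl]
      apply PySem.List.foldl_congr_mem
      intro acc c hcmem
      rw [countsOf_eq]
      have hcond : ((([x] : List String).countP (fun s => decide (c ∈ pyChars s)) : Int)
          == (([x] : List String).length : Int)) = true := by
        simp [hcmem]
      rw [hcond]
      simp
    · -- at least two strings: the last loop iteration filters the last string's characters
      simp only [List.concat_eq_append, gemstones_alt]
      rw [show (x :: (ys ++ [q])) = (x :: ys) ++ [q] by simp,
          PySem.List.pyGetD_neg_one_append_singleton, List.foldl_append, List.foldl_cons,
          List.foldl_nil]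
      rw [show gemsStep (ys.foldl gemsStep (gemsSeed x)) q =
            (pyChars q).foldl
              (fun ng c =>
                if PySem.Set.contains (ys.foldl gemsStep (gemsSeed x)) c then PySem.Set.add ng c
                else ng)
              PySem.Set.empty from rfl]
      apply PySem.List.foldl_congr_mem
      intro acc c hcmem
      rw [countsOf_eq, cond_agree x ys q c hcmem]
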